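-- pv_equiv track=rewrite | github.com/Ethan0x0000/QCbot | services/pic_maker/player_legend.py | get_final_trophies
-- ===== SOURCE A (Python) =====
-- def get_final_trophies(day_data):
--     """
--     通过new_attacks和new_defenses中time值最大的元素所包含的trophies属性来确定当天最终奖杯
--     如果都没有，则返回None
--     """
--     max_time = 0
--     final_trophies = None
--
--     # 检查进攻记录
--     for attack in day_data.get('new_attacks', []):
--         if attack.get('time', 0) > max_time and 'trophies' in attack:
--             max_time = attack['time']
--             final_trophies = attack['trophies']
--
--     # 检查防守记录
--     for defense in day_data.get('new_defenses', []):
--         if defense.get('time', 0) > max_time and 'trophies' in defense: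
--             max_time = defense['time']
--             final_trophies = defense['trophies']
--
--     return final_trophies
-- ===== SOURCE B (Python) =====
-- def get_final_trophies(day_data):
--     """
--     通过new_attacks和new_defenses中time值最大的元素所包含的trophies属性来确定当天最终奖杯
--     如果都没有，则返回None
--     """
--     entries = day_data.get('new_attacks', []) + day_data.get('new_defenses', [])
--     times = [e['time'] for e in entries if 'trophies' in e and e.get('time', 0) > 0]
--     if not times:
--         return None
--     t = max(times)
--     for e in entries:
--         if 'trophies' in e and e.get('time', 0) == t:
--             return e['trophies']
-- ===== Notes on version B (the rewrite author's own statement) =====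
-- stated objective: alternative
-- what changed: Replaces A's single running-max accumulator pass (threshold state max_time/final_trophies) by two staged passes: first collect the candidate timestamps and take their max, then rescan the entries and return the trophies of the first entry carrying that winning timestamp.
import Mathlib
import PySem

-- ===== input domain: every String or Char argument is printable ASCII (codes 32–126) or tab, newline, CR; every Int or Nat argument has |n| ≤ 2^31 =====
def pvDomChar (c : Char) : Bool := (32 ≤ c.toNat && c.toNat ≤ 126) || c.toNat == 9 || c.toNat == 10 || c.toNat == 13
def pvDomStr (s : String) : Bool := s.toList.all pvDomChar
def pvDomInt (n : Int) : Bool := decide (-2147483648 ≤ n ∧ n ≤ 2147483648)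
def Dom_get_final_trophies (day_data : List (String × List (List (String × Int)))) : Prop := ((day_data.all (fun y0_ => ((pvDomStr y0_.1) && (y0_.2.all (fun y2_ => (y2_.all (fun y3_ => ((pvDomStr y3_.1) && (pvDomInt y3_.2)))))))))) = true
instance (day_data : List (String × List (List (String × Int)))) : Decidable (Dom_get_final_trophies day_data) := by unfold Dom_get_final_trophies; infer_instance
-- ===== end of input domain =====

-- B replaces A's single running-max accumulator pass by two staged passes:
-- collect candidate timestamps and take their max, then rescan the entries for
-- the first one with that timestamp — an alternative decomposition, same value.


-- ===== PORT A =====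
-- A's loop body; `attack['time']` / `attack['trophies']` are read with getD/get?,
-- which is exact here: the guard ensures both keys are present when they are read.
def pvStepA (st : Int × Option Int) (attack : List (String × Int)) : Int × Option Int :=
  if decide (PySem.Dict.getD (PySem.Dict.mk attack) "time" 0 > st.1)
      && PySem.Dict.contains (PySem.Dict.mk attack) "trophies" then
    (PySem.Dict.getD (PySem.Dict.mk attack) "time" 0,
     PySem.Dict.get? (PySem.Dict.mk attack) "trophies")
  else st

def get_final_trophies (day_data : List (String × List (List (String × Int)))) : Option Int :=
  -- max_time = 0, final_trophies = None; first the attack loop, then the defense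
  -- loop continuing from the same state; return the final_trophies component
  ((PySem.Dict.getD (PySem.Dict.mk day_data) "new_defenses" []).foldl pvStepA
    ((PySem.Dict.getD (PySem.Dict.mk day_data) "new_attacks" []).foldl pvStepA
      ((0 : Int), (none : Option Int)))).2

-- ===== PORT B =====
-- e.get('time', 0) and the comprehension's filter; `e['time']` in the
-- comprehension is exact as getD: the filter guarantees 'time' is present there
def pvKeyB (e : List (String × Int)) : Int := PySem.Dict.getD (PySem.Dict.mk e) "time" 0

def pvCandB (e : List (String × Int)) : Bool :=
  PySem.Dict.contains (PySem.Dict.mk e) "trophies" && decide (pvKeyB e > 0)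

-- the second pass: the for-loop with its early return; `e['trophies']` via get?
-- is exact, the guard ensures the key is present; falling off the loop = none
def pvFindB (t : Int) : List (List (String × Int)) → Option Int
  | [] => none
  | e :: rest =>
    if PySem.Dict.contains (PySem.Dict.mk e) "trophies" && decide (pvKeyB e = t) then
      PySem.Dict.get? (PySem.Dict.mk e) "trophies"
    else pvFindB t rest

def get_final_trophies_alt (day_data : List (String × List (List (String × Int)))) : Option Int :=
  let entries := PySem.Dict.getD (PySem.Dict.mk day_data) "new_attacks" []
      ++ PySem.Dict.getD (PySem.Dict.mk day_data) "new_defenses" []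
  let times := (entries.filter pvCandB).map pvKeyB
  match PySem.List.max? times (fun x => x) with
  | none => none
  | some t => pvFindB t entries

-- ===== PRECONDITION & SPEC =====
def Spec_get_final_trophies (day_data : List (String × List (List (String × Int)))) (out : Option Int) : Prop := out = get_final_trophies_alt day_data
instance (day_data : List (String × List (List (String × Int)))) (out : Option Int) : Decidable (Spec_get_final_trophies day_data out) := by unfold Spec_get_final_trophies; infer_instance

-- ===== CLAIM (what is proved, stated in full; the proofs are below) =====
def Claim_equal_get_final_trophies : Prop := ∀ (day_data : List (String × List (List (String × Int)))), Dom_get_final_trophies day_data → Spec_get_final_trophies day_data (get_final_trophies day_data)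

-- ===== LEMMAS AND PROOFS =====

-- first-maximal argmax step, the common reference point of both proofs
def pvMaxStep (acc : Option (List (String × Int))) (e : List (String × Int)) :
    Option (List (String × Int)) :=
  match acc with
  | none => some e
  | some m => if pvKeyB m < pvKeyB e then some e else some m

-- the invariant linking A's (max_time, final_trophies) state to the argmax accumulator
def pvR (m : Int) (ft : Option Int) (acc : Option (List (String × Int))) : Prop :=
  (acc = none ∧ m = 0 ∧ ft = none) ∨
  (∃ b, acc = some b ∧ pvCandB b = true ∧ pvKeyB b = m ∧
    ft = PySem.Dict.get? (PySem.Dict.mk b) "trophies")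

theorem pvStepA_eq (m : Int) (ft : Option Int) (e : List (String × Int)) :
    pvStepA (m, ft) e =
      if (decide (PySem.Dict.getD (PySem.Dict.mk e) "time" 0 > m)
          && PySem.Dict.contains (PySem.Dict.mk e) "trophies") = true then
        (PySem.Dict.getD (PySem.Dict.mk e) "time" 0,
         PySem.Dict.get? (PySem.Dict.mk e) "trophies")
      else (m, ft) := rfl

theorem pvR_step (e : List (String × Int)) (m : Int) (ft : Option Int)
    (acc : Option (List (String × Int))) (h : pvR m ft acc) :
    pvR (pvStepA (m, ft) e).1 (pvStepA (m, ft) e).2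
      (if pvCandB e then pvMaxStep acc e else acc) := by
  rcases h with ⟨hacc, hm0, hft⟩ | ⟨b, hacc, hb, hk, hft⟩
  · subst hacc hm0 hft
    by_cases hc : pvCandB e = true
    · have htr : PySem.Dict.contains (PySem.Dict.mk e) "trophies" = true ∧ 0 < pvKeyB e := by
        simpa [pvCandB] using hc
      have hguard : (decide (PySem.Dict.getD (PySem.Dict.mk e) "time" 0 > (0:Int))
          && PySem.Dict.contains (PySem.Dict.mk e) "trophies") = true := by
        have h2 := htr.2; simp only [pvKeyB] at h2
        rw [htr.1, decide_eq_true h2]; rfl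
      rw [pvStepA_eq, if_pos hguard, if_pos hc]
      exact Or.inr ⟨e, rfl, hc, rfl, rfl⟩
    · have hc' := hc
      simp only [pvCandB, pvKeyB, Bool.and_eq_true, decide_eq_true_eq, not_and] at hc'
      have hguard : (decide (PySem.Dict.getD (PySem.Dict.mk e) "time" 0 > (0:Int))
          && PySem.Dict.contains (PySem.Dict.mk e) "trophies") = false := by
        rcases Bool.eq_false_or_eq_true
          (PySem.Dict.contains (PySem.Dict.mk e) "trophies") with ht | ht
        · have hng := hc' ht
          rw [ht, Bool.and_true, decide_eq_false hng]
        · rw [ht, Bool.and_false]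
      rw [pvStepA_eq, if_neg (by rw [hguard]; exact Bool.false_ne_true), if_neg hc]
      exact Or.inl ⟨rfl, rfl, rfl⟩
  · subst hacc hk hft
    by_cases hgt : pvKeyB b < pvKeyB e
    · by_cases htr : PySem.Dict.contains (PySem.Dict.mk e) "trophies" = true
      · have hbpos : 0 < pvKeyB b := by
          simp only [pvCandB, Bool.and_eq_true, decide_eq_true_eq] at hb; exact hb.2
        have hc : pvCandB e = true := by
          simp only [pvCandB, htr, Bool.true_and, decide_eq_true_eq]; omega
        have hgt' := hgt; simp only [pvKeyB] at hgt'
        have hguard : (decide (PySem.Dict.getD (PySem.Dict.mk e) "time" 0 > pvKeyB b)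
            && PySem.Dict.contains (PySem.Dict.mk e) "trophies") = true := by
          rw [htr, Bool.and_true,
            decide_eq_true (show PySem.Dict.getD (PySem.Dict.mk e) "time" 0 >
              pvKeyB b from hgt')]
        rw [pvStepA_eq, if_pos hguard, if_pos hc]
        refine Or.inr ⟨e, ?_, hc, rfl, rfl⟩
        simp only [pvMaxStep]
        rw [if_pos hgt]
      · have hc : pvCandB e = false := by
          simp only [pvCandB, Bool.eq_false_iff.mpr htr, Bool.false_and]
        have hguard : (decide (PySem.Dict.getD (PySem.Dict.mk e) "time" 0 > pvKeyB b)
            && PySem.Dict.contains (PySem.Dict.mk e) "trophies") = false := by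
          rw [Bool.eq_false_iff.mpr htr, Bool.and_false]
        rw [pvStepA_eq, if_neg (by rw [hguard]; exact Bool.false_ne_true),
          if_neg (by rw [hc]; exact Bool.false_ne_true)]
        exact Or.inr ⟨b, rfl, hb, rfl, rfl⟩
    · have hgt' := hgt; simp only [pvKeyB] at hgt'
      have hguard : (decide (PySem.Dict.getD (PySem.Dict.mk e) "time" 0 > pvKeyB b)
          && PySem.Dict.contains (PySem.Dict.mk e) "trophies") = false := by
        rw [decide_eq_false (show ¬ PySem.Dict.getD (PySem.Dict.mk e) "time" 0 >
            pvKeyB b from hgt'), Bool.false_and]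
      rw [pvStepA_eq, if_neg (by rw [hguard]; exact Bool.false_ne_true)]
      have hmax : (if pvCandB e then pvMaxStep (some b) e else some b) = some b := by
        by_cases hc : pvCandB e = true
        · rw [if_pos hc]; simp only [pvMaxStep]; rw [if_neg hgt]
        · rw [if_neg hc]
      rw [hmax]
      exact Or.inr ⟨b, rfl, hb, rfl, rfl⟩

theorem pvR_fold (L : List (List (String × Int))) :
    ∀ (m : Int) (ft : Option Int) (acc : Option (List (String × Int))),
    pvR m ft acc →
    pvR (L.foldl pvStepA (m, ft)).1 (L.foldl pvStepA (m, ft)).2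
      ((L.filter pvCandB).foldl pvMaxStep acc) := by
  induction L with
  | nil => intro m ft acc h; simpa using h
  | cons e t ih =>
    intro m ft acc h
    have hs := pvR_step e m ft acc h
    by_cases hc : pvCandB e = true
    · simpa [List.filter_cons, hc] using
        ih (pvStepA (m, ft) e).1 (pvStepA (m, ft) e).2 (pvMaxStep acc e)
          (by simpa [hc] using hs)
    · simp only [Bool.not_eq_true] at hc
      simpa [List.filter_cons, hc] using
        ih (pvStepA (m, ft) e).1 (pvStepA (m, ft) e).2 acc
          (by simpa [hc] using hs)

-- PySem.List.max? over the mapped keys is the key of the argmax fold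
def pvStepI (acc : Option Int) (x : Int) : Option Int :=
  match acc with
  | none => some x
  | some m => if m < x then some x else some m

theorem pvMax?_eq_foldlI (ys : List Int) :
    PySem.List.max? ys (fun x => x) = ys.foldl pvStepI none := by
  unfold PySem.List.max? pvStepI
  congr 1
  funext acc x
  cases acc <;> rfl

theorem pvMax?_map (xs : List (List (String × Int))) :
    PySem.List.max? (xs.map pvKeyB) (fun x => x)
      = Option.map pvKeyB (xs.foldl pvMaxStep none) := by
  rw [pvMax?_eq_foldlI]
  suffices h : ∀ (acc : Option (List (String × Int))),
      (xs.map pvKeyB).foldl pvStepI (Option.map pvKeyB acc)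
        = Option.map pvKeyB (xs.foldl pvMaxStep acc) from h none
  induction xs with
  | nil => intro acc; rfl
  | cons e t ih =>
    intro acc
    cases acc with
    | none => simpa [pvStepI] using ih (some e)
    | some m =>
      simp only [List.map_cons, List.foldl_cons, Option.map_some, pvMaxStep, pvStepI]
      by_cases hlt : pvKeyB m < pvKeyB e
      · rw [if_pos hlt, if_pos hlt]; simpa using ih (some e)
      · rw [if_neg hlt, if_neg hlt]; simpa using ih (some m)

-- the argmax fold from a seeded accumulator: result is the seed (and nothing
-- beats it) or the FIRST strictly greater candidate in L
theorem pvFold_first (L : List (List (String × Int))) :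
    ∀ (m : List (String × Int)), pvCandB m = true →
    ∃ r, (L.filter pvCandB).foldl pvMaxStep (some m) = some r ∧ pvCandB r = true ∧
      ((r = m ∧ ∀ e ∈ L, pvCandB e = true → pvKeyB e ≤ pvKeyB m) ∨
       (∃ L1 L2, L = L1 ++ r :: L2 ∧ pvKeyB m < pvKeyB r ∧
         ∀ e ∈ L1, pvCandB e = true → pvKeyB e < pvKeyB r)) := by
  induction L with
  | nil => intro m hm; exact ⟨m, rfl, hm, Or.inl ⟨rfl, by simp⟩⟩
  | cons e t ih =>
    intro m hm
    by_cases hc : pvCandB e = true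
    · by_cases hlt : pvKeyB m < pvKeyB e
      · obtain ⟨r, hr, hrc, hcase⟩ := ih e hc
        refine ⟨r, ?_, hrc, ?_⟩
        · simpa [List.filter_cons, hc, pvMaxStep, hlt] using hr
        · rcases hcase with ⟨rfl, hle⟩ | ⟨L1, L2, rfl, hgt, hL1⟩
          · exact Or.inr ⟨[], t, rfl, hlt, by simp⟩
          · exact Or.inr ⟨e :: L1, L2, rfl, lt_trans hlt hgt,
              by
                intro x hx hxc
                rcases List.mem_cons.mp hx with rfl | hx
                · exact hgt
                · exact hL1 x hx hxc⟩
      · obtain ⟨r, hr, hrc, hcase⟩ := ih m hm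
        refine ⟨r, ?_, hrc, ?_⟩
        · simpa [List.filter_cons, hc, pvMaxStep, hlt] using hr
        · rcases hcase with ⟨rfl, hle⟩ | ⟨L1, L2, rfl, hgt, hL1⟩
          · refine Or.inl ⟨rfl, ?_⟩
            intro x hx hxc
            rcases List.mem_cons.mp hx with rfl | hx
            · omega
            · exact hle x hx hxc
          · exact Or.inr ⟨e :: L1, L2, rfl, hgt,
              by
                intro x hx hxc
                rcases List.mem_cons.mp hx with rfl | hx
                · omega
                · exact hL1 x hx hxc⟩
    · obtain ⟨r, hr, hrc, hcase⟩ := ih m hm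
      refine ⟨r, by simpa [List.filter_cons, hc] using hr, hrc, ?_⟩
      rcases hcase with ⟨rfl, hle⟩ | ⟨L1, L2, rfl, hgt, hL1⟩
      · refine Or.inl ⟨rfl, ?_⟩
        intro x hx hxc
        rcases List.mem_cons.mp hx with rfl | hx
        · exact absurd hxc (by simpa using hc)
        · exact hle x hx hxc
      · exact Or.inr ⟨e :: L1, L2, rfl, hgt,
          by
            intro x hx hxc
            rcases List.mem_cons.mp hx with rfl | hx
            · exact absurd hxc (by simpa using hc)
            · exact hL1 x hx hxc⟩

-- from a none accumulator: either no candidates at all, or the result is the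
-- first candidate attaining the maximal key, located inside L
theorem pvFold_none (L : List (List (String × Int))) :
    ((L.filter pvCandB).foldl pvMaxStep none = none ∧ ∀ e ∈ L, pvCandB e = false) ∨
    (∃ b L1 L2, (L.filter pvCandB).foldl pvMaxStep none = some b ∧
      L = L1 ++ b :: L2 ∧ pvCandB b = true ∧
      ∀ e ∈ L1, pvCandB e = true → pvKeyB e < pvKeyB b) := by
  induction L with
  | nil => exact Or.inl ⟨rfl, by simp⟩
  | cons e t ih =>
    by_cases hc : pvCandB e = true
    · obtain ⟨r, hr, hrc, hcase⟩ := pvFold_first t e hc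
      refine Or.inr ⟨r, ?_⟩
      rcases hcase with ⟨rfl, hle⟩ | ⟨L1, L2, rfl, hgt, hL1⟩
      · exact ⟨[], t, by simpa [List.filter_cons, hc, pvMaxStep] using hr, rfl, hrc, by simp⟩
      · refine ⟨e :: L1, L2, by simpa [List.filter_cons, hc, pvMaxStep] using hr, rfl, hrc, ?_⟩
        intro x hx hxc
        rcases List.mem_cons.mp hx with rfl | hx
        · exact hgt
        · exact hL1 x hx hxc
    · rcases ih with ⟨h0, hall⟩ | ⟨b, L1, L2, hb, rfl, hbc, hL1⟩
      · refine Or.inl ⟨by simpa [List.filter_cons, hc] using h0, ?_⟩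
        intro x hx
        rcases List.mem_cons.mp hx with rfl | hx
        · simpa using hc
        · exact hall x hx
      · refine Or.inr ⟨b, e :: L1, L2, by simpa [List.filter_cons, hc] using hb, rfl, hbc, ?_⟩
        intro x hx hxc
        rcases List.mem_cons.mp hx with rfl | hx
        · exact absurd hxc (by simpa using hc)
        · exact hL1 x hx hxc

-- the second pass finds exactly the first-maximal candidate
theorem pvFind_at (L1 L2 : List (List (String × Int))) (b : List (String × Int))
    (hb : pvCandB b = true)
    (h1 : ∀ e ∈ L1, pvCandB e = true → pvKeyB e < pvKeyB b) :
    pvFindB (pvKeyB b) (L1 ++ b :: L2) = PySem.Dict.get? (PySem.Dict.mk b) "trophies" := by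
  induction L1 with
  | nil =>
    have htr : PySem.Dict.contains (PySem.Dict.mk b) "trophies" = true := by
      simp only [pvCandB, Bool.and_eq_true] at hb; exact hb.1
    simp [pvFindB, htr]
  | cons e t ih =>
    have hbpos : 0 < pvKeyB b := by
      simp only [pvCandB, Bool.and_eq_true, decide_eq_true_eq] at hb; exact hb.2
    have hguard : (PySem.Dict.contains (PySem.Dict.mk e) "trophies"
        && decide (pvKeyB e = pvKeyB b)) = false := by
      by_cases htr : PySem.Dict.contains (PySem.Dict.mk e) "trophies" = true
      · have : ¬ pvKeyB e = pvKeyB b := by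
          intro heq
          have hec : pvCandB e = true := by
            simp only [pvCandB, htr, Bool.true_and, decide_eq_true_eq]; omega
          have := h1 e (List.mem_cons_self) hec
          omega
        rw [htr, Bool.true_and, decide_eq_false this]
      · rw [Bool.eq_false_iff.mpr htr, Bool.false_and]
    show pvFindB (pvKeyB b) (e :: (t ++ b :: L2)) = _
    rw [pvFindB, if_neg (by rw [hguard]; exact Bool.false_ne_true)]
    exact ih (fun x hx hxc => h1 x (List.mem_cons_of_mem _ hx) hxc)

-- ===== VERDICT (by name: the statement is the Claim_ definition above) =====
theorem get_final_trophies_spec : Claim_equal_get_final_trophies := by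
  intro day_data _
  unfold Spec_get_final_trophies get_final_trophies get_final_trophies_alt
  rw [← List.foldl_append]
  set L := PySem.Dict.getD (PySem.Dict.mk day_data) "new_attacks" []
      ++ PySem.Dict.getD (PySem.Dict.mk day_data) "new_defenses" [] with hL
  have hA := pvR_fold L 0 none none (Or.inl ⟨rfl, rfl, rfl⟩)
  show (List.foldl pvStepA (0, none) L).2 =
    match PySem.List.max? ((L.filter pvCandB).map pvKeyB) (fun x => x) with
    | none => none
    | some t => pvFindB t L
  rw [pvMax?_map]
  rcases pvFold_none L with ⟨h0, -⟩ | ⟨b, L1, L2, hb, hdec, hbc, hL1⟩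
  · rw [h0] at hA ⊢
    rcases hA with ⟨-, -, hft⟩ | ⟨b, hacc, -⟩
    · simpa using hft
    · exact absurd hacc (by simp)
  · rw [hb] at hA ⊢
    rcases hA with ⟨hacc, -⟩ | ⟨b', hacc, -, -, hft⟩
    · exact absurd hacc (by simp)
    · have hbb : b = b' := by simpa using hacc
      subst hbb
      simpa [hdec] using (hft.trans (pvFind_at L1 L2 b hbc hL1).symm)
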